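-- pv_equiv track=rewrite | github.com/utczbr/h2_plant | h2_plant/legacy/H2-StorageModel_21-10-25/H2DemandwithNightShift.py | time_until_night_shift_calculation
-- ===== SOURCE A (Python) =====
-- def time_until_night_shift_calculation(current_time):
--
--     night_shift_starts = [1380, 2820, 4260, 5700, 7140]  # Start times of night shifts in minutes since start of week (Monday–Friday) (weekend of 1 day is considered)
--
--     time_in_week = current_time % 10080  # Wraps for multi-week simulations
--
--     for start_time in night_shift_starts:
--         if time_in_week < start_time:
--             time_until_night_shift = start_time - time_in_week
--             return time_until_night_shift
--
--     # No night shifts left in current week — return time until next week's first shift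
--     time_until_night_shift = (night_shift_starts[0] + 10080) - time_in_week
--     return time_until_night_shift
-- ===== SOURCE B (Python) =====
-- def time_until_night_shift_calculation(current_time):
--     # closed form: shift starts are the arithmetic progression 1380 + 1440*k, k = 0..4
--     time_in_week = current_time % 10080
--     offset = time_in_week - 1380
--     if offset < 0:
--         return 1380 - time_in_week
--     k = offset // 1440 + 1
--     if k > 4:
--         return 11460 - time_in_week  # first shift of next week
--     return 1380 + 1440 * k - time_in_week
-- ===== Notes on version B (the rewrite author's own statement) =====
-- stated objective: simpler
-- what changed: Replaces the linear scan over the list of shift starts with a direct division-based closed form exploiting that the starts are the arithmetic progression 1380 + 1440*k, k = 0..4.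
import Mathlib
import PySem

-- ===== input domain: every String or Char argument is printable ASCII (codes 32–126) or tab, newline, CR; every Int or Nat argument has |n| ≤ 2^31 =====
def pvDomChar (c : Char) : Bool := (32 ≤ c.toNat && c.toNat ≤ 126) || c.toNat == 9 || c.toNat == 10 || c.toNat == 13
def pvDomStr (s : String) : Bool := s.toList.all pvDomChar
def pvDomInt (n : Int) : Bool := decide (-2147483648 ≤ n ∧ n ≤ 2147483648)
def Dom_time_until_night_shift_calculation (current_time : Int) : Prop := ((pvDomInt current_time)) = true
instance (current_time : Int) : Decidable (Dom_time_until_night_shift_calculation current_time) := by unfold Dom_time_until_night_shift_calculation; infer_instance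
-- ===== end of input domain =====

-- B replaces A's scan over the list of shift starts with a closed-form
-- division on the arithmetic progression 1380 + 1440*k (objective: simpler).


-- ===== PORT A =====
-- the 'for start_time in night_shift_starts: if … return' loop, step for step
def pvScanA (time_in_week : Int) : List Int → Int
  | [] => (1380 + 10080) - time_in_week
  | start_time :: rest =>
      if time_in_week < start_time then start_time - time_in_week
      else pvScanA time_in_week rest

def time_until_night_shift_calculation (current_time : Int) : Int :=
  let night_shift_starts : List Int := [1380, 2820, 4260, 5700, 7140]
  let time_in_week := PySem.Int.mod current_time 10080
  pvScanA time_in_week night_shift_starts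

-- ===== PORT B =====
def time_until_night_shift_calculation_alt (current_time : Int) : Int :=
  let time_in_week := PySem.Int.mod current_time 10080
  let offset := time_in_week - 1380
  if offset < 0 then 1380 - time_in_week
  else
    let k := PySem.Int.floordiv offset 1440 + 1
    if k > 4 then 11460 - time_in_week
    else 1380 + 1440 * k - time_in_week

-- ===== PRECONDITION & SPEC =====
def Spec_time_until_night_shift_calculation (current_time : Int) (out : Int) : Prop := out = time_until_night_shift_calculation_alt current_time
instance (current_time : Int) (out : Int) : Decidable (Spec_time_until_night_shift_calculation current_time out) := by unfold Spec_time_until_night_shift_calculation; infer_instance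

-- ===== CLAIM (what is proved, stated in full; the proofs are below) =====
def Claim_equal_time_until_night_shift_calculation : Prop := ∀ (current_time : Int), Dom_time_until_night_shift_calculation current_time → Spec_time_until_night_shift_calculation current_time (time_until_night_shift_calculation current_time)

-- ===== LEMMAS AND PROOFS =====

-- ===== VERDICT (by name: the statement is the Claim_ definition above) =====
theorem time_until_night_shift_calculation_spec : Claim_equal_time_until_night_shift_calculation := by
  intro c _
  unfold Spec_time_until_night_shift_calculation
  unfold time_until_night_shift_calculation time_until_night_shift_calculation_alt
  have hmod : PySem.Int.mod c 10080 = c % 10080 := PySem.Int.mod_eq_emod_of_pos (by norm_num)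
  have h0 : 0 ≤ c % 10080 := Int.emod_nonneg c (by norm_num)
  have h1 : c % 10080 < 10080 := Int.emod_lt_of_pos c (by norm_num)
  rw [hmod]
  generalize c % 10080 = t at h0 h1 ⊢
  show pvScanA t [1380, 2820, 4260, 5700, 7140] =
    if t - 1380 < 0 then 1380 - t
    else if PySem.Int.floordiv (t - 1380) 1440 + 1 > 4 then 11460 - t
    else 1380 + 1440 * (PySem.Int.floordiv (t - 1380) 1440 + 1) - t
  have hdiv : PySem.Int.floordiv (t - 1380) 1440 = (t - 1380) / 1440 :=
    PySem.Int.floordiv_eq_ediv_of_pos (by norm_num)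
  simp only [pvScanA, hdiv]
  split_ifs <;> omega
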